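-- pv_equiv track=rewrite | github.com/raeez/chiral-bar-cobar | compute/lib/annulus_trace_verification.py | _count_periodic_tuples
-- ===== SOURCE A (Python) =====
-- from typing import Dict, List, Optional, Tuple
--
-- def _enumerate_weight_tuples_bar(weights: List[int],
--                                  length: int) -> List[Tuple[int, ...]]:
--     """Enumerate all tuples of weights of given length."""
--     if length == 0:
--         return [()]
--     result = []
--     for t in _enumerate_weight_tuples_bar(weights, length - 1):
--         for w in weights:
--             result.append(t + (w,))
--     return result
--
-- def _count_periodic_tuples(weights: List[int], length: int,
--                            period: int, weight_bound: int) -> int: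
--     """Count tuples of given length that are periodic with given period.
--
--     A tuple (a_0, ..., a_{n}) has period p if a_i = a_{i mod p} for all i,
--     AND p divides length.
--
--     Returns the number of such tuples with total weight <= weight_bound.
--     """
--     if length % period != 0:
--         return 0
--
--     repeats = length // period
--
--     # Enumerate all tuples of length = period
--     base_tuples = _enumerate_weight_tuples_bar(weights, period)
--     count = 0
--     for bt in base_tuples:
--         total_weight = sum(bt) * repeats
--         if total_weight <= weight_bound:
--             count += 1
--
--     return count
-- ===== SOURCE B (Python) =====
-- def _count_periodic_tuples(weights, length, period, weight_bound):
--     if length % period != 0: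
--         return 0
--     repeats = length // period
--     # DP: counts[s] = number of weight-tuples of the current length with total weight s
--     counts = {0: 1}
--     for _ in range(period):
--         new = {}
--         for s, c in counts.items():
--             for w in weights:
--                 new[s + w] = new.get(s + w, 0) + c
--         counts = new
--     return sum(c for s, c in counts.items() if s * repeats <= weight_bound)
-- ===== Notes on version B (the rewrite author's own statement) =====
-- stated objective: alternative
-- what changed: Replaces the explicit enumeration of all |weights|^period base tuples with a dynamic-programming dict that counts how many tuples reach each achievable total weight, then sums the counts whose weight*repeats is within the bound.
import Mathlib
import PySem

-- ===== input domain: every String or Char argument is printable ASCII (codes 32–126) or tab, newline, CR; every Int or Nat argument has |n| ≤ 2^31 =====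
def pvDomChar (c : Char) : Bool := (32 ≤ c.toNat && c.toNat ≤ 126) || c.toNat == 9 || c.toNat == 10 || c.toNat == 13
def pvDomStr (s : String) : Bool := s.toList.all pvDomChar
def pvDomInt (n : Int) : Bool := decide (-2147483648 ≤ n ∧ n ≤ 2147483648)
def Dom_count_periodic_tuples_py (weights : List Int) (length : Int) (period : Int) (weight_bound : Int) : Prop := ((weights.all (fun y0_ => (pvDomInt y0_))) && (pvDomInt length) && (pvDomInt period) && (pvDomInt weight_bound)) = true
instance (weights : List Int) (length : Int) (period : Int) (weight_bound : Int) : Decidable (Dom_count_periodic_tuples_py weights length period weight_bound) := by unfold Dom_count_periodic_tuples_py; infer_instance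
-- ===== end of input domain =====

-- B replaces A's explicit enumeration of all |weights|^period tuples by a dict-based
-- dynamic programme counting tuples per achievable total weight (objective: alternative algorithm).


-- ===== PORT A =====
-- _enumerate_weight_tuples_bar: Python recurses on length down to 0; on every input Pre_
-- admits the recursion is only entered with period > 0, where structural recursion on
-- period.toNat is exact.
def enumBar (weights : List Int) : Nat → List (List Int)
  | 0 => [[]]
  | n + 1 =>
      (enumBar weights n).foldl
        (fun result t =>
          weights.foldl (fun result2 w => result2 ++ [t ++ [w]]) result)
        []

def count_periodic_tuples_py (weights : List Int) (length : Int) (period : Int) (weight_bound : Int) : Int :=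
  if PySem.Int.mod length period ≠ 0 then 0
  else
    let repeats := PySem.Int.floordiv length period
    let base_tuples := enumBar weights period.toNat
    base_tuples.foldl
      (fun count bt => if bt.sum * repeats ≤ weight_bound then count + 1 else count) 0

-- ===== PORT B =====
-- one DP step of Source B: new[s + w] = new.get(s + w, 0) + c for every item (s, c) and weight w
def dpStep (weights : List Int) (counts : PySem.Dict Int Int) : PySem.Dict Int Int :=
  counts.items.foldl
    (fun nw sc =>
      weights.foldl
        (fun nw2 w => nw2.insert (sc.1 + w) (nw2.getD (sc.1 + w) 0 + sc.2)) nw)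
    PySem.Dict.empty

def count_periodic_tuples_py_alt (weights : List Int) (length : Int) (period : Int) (weight_bound : Int) : Int :=
  if PySem.Int.mod length period ≠ 0 then 0
  else
    let repeats := PySem.Int.floordiv length period
    let counts :=
      (PySem.List.pyRange 0 period 1).foldl (fun c _ => dpStep weights c)
        (PySem.Dict.ofList [((0 : Int), (1 : Int))])
    ((counts.items.filter (fun sc => decide (sc.1 * repeats ≤ weight_bound))).map (·.2)).sum

-- ===== PRECONDITION & SPEC =====
-- Pre_ excludes exactly the inputs where Python A raises: period = 0 (ZeroDivisionError in
-- 'length % period') and period < 0 with period dividing length (the enumeration recursion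
-- never reaches its base case: RecursionError); A returns normally on everything else.
def Pre_count_periodic_tuples_py (weights : List Int) (length : Int) (period : Int) (weight_bound : Int) : Prop :=
  0 < period ∨ (period < 0 ∧ PySem.Int.mod length period ≠ 0)
instance (weights : List Int) (length : Int) (period : Int) (weight_bound : Int) : Decidable (Pre_count_periodic_tuples_py weights length period weight_bound) := by unfold Pre_count_periodic_tuples_py; infer_instance

def pvWitness_count_periodic_tuples_py : List Int × Int × Int × Int := ([1, 2], 4, 2, 5)

def Spec_count_periodic_tuples_py (weights : List Int) (length : Int) (period : Int) (weight_bound : Int) (out : Int) : Prop := out = count_periodic_tuples_py_alt weights length period weight_bound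
instance (weights : List Int) (length : Int) (period : Int) (weight_bound : Int) (out : Int) : Decidable (Spec_count_periodic_tuples_py weights length period weight_bound out) := by unfold Spec_count_periodic_tuples_py; infer_instance

-- ===== CLAIM (what is proved, stated in full; the proofs are below) =====
def Claim_equal_count_periodic_tuples_py : Prop := ∀ (weights : List Int) (length : Int) (period : Int) (weight_bound : Int), Dom_count_periodic_tuples_py weights length period weight_bound → Pre_count_periodic_tuples_py weights length period weight_bound → Spec_count_periodic_tuples_py weights length period weight_bound (count_periodic_tuples_py weights length period weight_bound)

-- ===== LEMMAS AND PROOFS =====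

theorem count_periodic_tuples_py_witness_ok :
    Dom_count_periodic_tuples_py (pvWitness_count_periodic_tuples_py.1) (pvWitness_count_periodic_tuples_py.2.1) (pvWitness_count_periodic_tuples_py.2.2.1) (pvWitness_count_periodic_tuples_py.2.2.2) ∧
    Pre_count_periodic_tuples_py (pvWitness_count_periodic_tuples_py.1) (pvWitness_count_periodic_tuples_py.2.1) (pvWitness_count_periodic_tuples_py.2.2.1) (pvWitness_count_periodic_tuples_py.2.2.2) := by
  decide

theorem sum_flatMap_int {α : Type} (l : List α) (f : α → List Int) :
    (l.flatMap f).sum = (l.map (fun a => (f a).sum)).sum := by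
  induction l with
  | nil => rfl
  | cons a l ih => simp [List.flatMap_cons, List.sum_append, ih]

-- L1
theorem enumBar_succ (W : List Int) (n : Nat) :
    enumBar W (n + 1) = (enumBar W n).flatMap (fun t => W.map (fun w => t ++ [w])) := by
  show List.foldl _ [] (enumBar W n) = _
  rw [PySem.List.foldl_congr_mem (enumBar W n) _
    (fun result t => result ++ W.map (fun w => t ++ [w])) []
    (fun acc t _ => PySem.List.foldl_append_singleton_eq_map ..)]
  exact PySem.List.foldl_append_eq_flatMap ..

-- L2
theorem sums_succ (W : List Int) (n : Nat) :
    (enumBar W (n + 1)).map List.sum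
      = ((enumBar W n).map List.sum).flatMap (fun s => W.map (s + ·)) := by
  rw [enumBar_succ, List.map_flatMap, List.flatMap_map]
  congr 1; funext t
  simp [Function.comp_def, List.sum_append]

-- L3
theorem foldl_foldl_pairs {α β γ : Type} (l : List α) (m : List β) (f : γ → α → β → γ) (init : γ) :
    l.foldl (fun acc a => m.foldl (fun acc2 b => f acc2 a b) acc) init
      = (l.flatMap (fun a => m.map (fun b => (a, b)))).foldl (fun acc p => f acc p.1 p.2) init := by
  induction l generalizing init with
  | nil => rfl
  | cons a l ih =>
      simp only [List.foldl_cons, List.flatMap_cons, List.foldl_append, List.foldl_map, ih]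

-- L4
theorem getD_foldl_insert_add (Q : List ((Int × Int) × Int)) (d : PySem.Dict Int Int) (x : Int) :
    (Q.foldl (fun d p => d.insert (p.1.1 + p.2) (d.getD (p.1.1 + p.2) 0 + p.1.2)) d).getD x 0
      = d.getD x 0 + ((Q.filter (fun p => p.1.1 + p.2 == x)).map (fun p => p.1.2)).sum := by
  induction Q generalizing d with
  | nil => simp
  | cons q Q ih =>
      simp only [List.foldl_cons, ih, List.filter_cons]
      by_cases h : q.1.1 + q.2 = x
      · simp [h]
        ring
      · have h' : x ≠ q.1.1 + q.2 := fun hx => h hx.symm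
        have hb : (q.1.1 + q.2 == x) = false := by simpa using h
        simp [hb, PySem.Dict.getD_insert, h']

-- L5
theorem contains_foldl_insert_add (Q : List ((Int × Int) × Int)) (d : PySem.Dict Int Int) (x : Int) :
    (Q.foldl (fun d p => d.insert (p.1.1 + p.2) (d.getD (p.1.1 + p.2) 0 + p.1.2)) d).contains x
      = (d.contains x || Q.any (fun p => p.1.1 + p.2 == x)) := by
  induction Q generalizing d with
  | nil => simp
  | cons q Q ih =>
      simp only [List.foldl_cons, ih, PySem.Dict.contains_insert, List.any_cons]
      by_cases h : x = q.1.1 + q.2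
      · have h1 : (x == q.1.1 + q.2) = true := by simpa using h
        have h2 : (q.1.1 + q.2 == x) = true := by simpa using h.symm
        simp [h1, h2]
      · have h1 : (x == q.1.1 + q.2) = false := by simpa using h
        have h2 : (q.1.1 + q.2 == x) = false := by simpa using (fun hx => h hx.symm : ¬ q.1.1 + q.2 = x)
        simp [h1, h2]

-- L7
theorem key_sum (f : Int → Int) : ∀ (ks L : List Int), ks.Nodup → (∀ x, x ∈ ks ↔ x ∈ L) →
    (ks.map (fun s => (L.count s : Int) * f s)).sum = (L.map f).sum := by
  intro ks
  induction ks with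
  | nil =>
      intro L _ hmem
      have : L = [] := List.eq_nil_iff_forall_not_mem.2 (fun x hx => by simpa using (hmem x).2 hx)
      simp [this]
  | cons s ks ih =>
      intro L hnd hmem
      have hs : s ∉ ks := (List.nodup_cons.1 hnd).1
      have hnd' : ks.Nodup := (List.nodup_cons.1 hnd).2
      set L' := L.filter (fun x => !(x == s)) with hL'
      have hperm : (L.filter (fun x => x == s) ++ L').Perm L := List.filter_append_perm _ L
      have hmem' : ∀ x, x ∈ ks ↔ x ∈ L' := by
        intro x
        constructor
        · intro hx
          have hxs : x ≠ s := fun h => hs (h ▸ hx)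
          have hxL : x ∈ L := (hmem x).1 (List.mem_cons_of_mem _ hx)
          simp [hL', List.mem_filter, hxL, hxs]
        · intro hx
          rcases List.mem_filter.1 hx with ⟨hxL, hxs⟩
          have hxs' : x ≠ s := by simpa using hxs
          rcases List.mem_cons.1 ((hmem x).2 hxL) with h | h
          · exact absurd h hxs'
          · exact h
      have hcount : ∀ x, x ∈ ks → L'.count x = L.count x := by
        intro x hx
        have hxs : (!(x == s)) = true := by
          have : x ≠ s := fun h => hs (h ▸ hx)
          simpa using this
        rw [hL']
        exact List.count_filter hxs
      have hrec := ih L' hnd' hmem'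
      have hR : (L.map f).sum = (L.count s : Int) * f s + (L'.map f).sum := by
        have hsum := (hperm.map f).sum_eq
        rw [← hsum, List.map_append, List.sum_append, List.filter_beq, List.map_replicate,
          List.sum_replicate_int]
      rw [List.map_cons, List.sum_cons, hR]
      congr 1
      rw [← hrec]
      exact congrArg List.sum (List.map_congr_left (fun x hx => by rw [hcount x hx]))

-- L8
theorem items_map_eq_keys_map (d : PySem.Dict Int Int) (hnd : d.keys.Nodup) (g : Int → Int → Int) :
    (d.items.map (fun sc => g sc.1 sc.2)).sum = (d.keys.map (fun s => g s (d.getD s 0))).sum := by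
  have h1 : d.keys.map (fun s => g s (d.getD s 0)) = d.items.map (fun sc => g sc.1 (d.getD sc.1 0)) := by
    simp only [PySem.Dict.keys, List.map_map]; rfl
  rw [h1]
  refine congrArg List.sum (List.map_congr_left (fun sc hsc => ?_))
  rw [PySem.Dict.getD_of_mem_items d (k := sc.1) (v := sc.2) hsc hnd]

def DPInv (L : List Int) (d : PySem.Dict Int Int) : Prop :=
  d.keys.Nodup ∧ (∀ x, d.getD x 0 = (L.count x : Int)) ∧ (∀ x, x ∈ d.keys ↔ x ∈ L)

-- L9
theorem dpStep_inv (W L : List Int) (d : PySem.Dict Int Int) (h : DPInv L d) :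
    DPInv (L.flatMap (fun s => W.map (s + ·))) (dpStep W d) := by
  obtain ⟨hnd, hget, hmem⟩ := h
  have hflat : dpStep W d
      = (d.items.flatMap (fun sc => W.map (fun w => (sc, w)))).foldl
          (fun nw p => nw.insert (p.1.1 + p.2) (nw.getD (p.1.1 + p.2) 0 + p.1.2)) PySem.Dict.empty := by
    unfold dpStep
    exact foldl_foldl_pairs ..
  set Q := d.items.flatMap (fun sc => W.map (fun w => (sc, w))) with hQ
  refine ⟨?_, ?_, ?_⟩
  · rw [hflat]
    exact PySem.Dict.nodup_keys_foldl_insert_key Q (fun p => p.1.1 + p.2)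
      (fun nw p => nw.getD (p.1.1 + p.2) 0 + p.1.2) PySem.Dict.empty (by simp)
  · intro x
    rw [hflat, getD_foldl_insert_add]
    have hfilter : ((Q.filter (fun p => p.1.1 + p.2 == x)).map (fun p => p.1.2)).sum
        = (d.items.map (fun sc => (L.count sc.1 : Int) * (W.countP (fun w => sc.1 + w == x) : Int))).sum := by
      rw [hQ, List.filter_flatMap, List.map_flatMap, sum_flatMap_int]
      refine congrArg List.sum (List.map_congr_left (fun sc hsc => ?_))
      simp only [Function.comp_def, List.filter_map, List.map_map]
      rw [PySem.List.sum_map_const_int, ← List.countP_eq_length_filter]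
      have hv : sc.2 = d.getD sc.1 0 :=
        (PySem.Dict.getD_of_mem_items d (k := sc.1) (v := sc.2) hsc hnd 0).symm
      rw [hv, hget sc.1]
      ring
    rw [hfilter, PySem.Dict.getD_empty, zero_add]
    have h8 := items_map_eq_keys_map d hnd
      (fun s _ => (L.count s : Int) * (W.countP (fun w => s + w == x) : Int))
    rw [h8, key_sum _ d.keys L hnd hmem]
    rw [List.count, List.countP_flatMap]
    push_cast
    rw [List.map_map]
    refine congrArg List.sum (List.map_congr_left (fun s _ => ?_))
    simp [List.countP_map, Function.comp_def]
  · intro x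
    rw [hflat, ← PySem.Dict.contains_iff_mem_keys, contains_foldl_insert_add]
    simp only [PySem.Dict.contains_empty, Bool.false_or, List.any_eq_true]
    constructor
    · rintro ⟨p, hp, hpx⟩
      rcases List.mem_flatMap.1 hp with ⟨sc, hsc, hpw⟩
      rcases List.mem_map.1 hpw with ⟨w, hw, rfl⟩
      refine List.mem_flatMap.2 ⟨sc.1, (hmem sc.1).1 ?_, ?_⟩
      · exact List.mem_map.2 ⟨sc, hsc, rfl⟩
      · exact List.mem_map.2 ⟨w, hw, by simpa using hpx⟩
    · intro hx
      rcases List.mem_flatMap.1 hx with ⟨s, hsL, hxw⟩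
      rcases List.mem_map.1 hxw with ⟨w, hw, rfl⟩
      have hsk : s ∈ d.keys := (hmem s).2 hsL
      rcases List.mem_map.1 hsk with ⟨sc, hsc, rfl⟩
      exact ⟨(sc, w), List.mem_flatMap.2 ⟨sc, hsc, List.mem_map.2 ⟨w, hw, rfl⟩⟩, by simp⟩

-- L10 base
theorem dp_base : DPInv [0] (PySem.Dict.ofList [((0:Int), (1:Int))]) := by
  have hk : (PySem.Dict.ofList [((0:Int), (1:Int))]).keys = [0] := by decide
  refine ⟨by decide, ?_, fun x => by rw [hk]⟩
  intro x
  by_cases h : x = 0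
  · subst h; decide
  · show (PySem.Dict.empty.insert (0:Int) 1).getD x 0 = _
    rw [PySem.Dict.getD_insert]
    simp [h, Ne.symm h]

-- L12a
theorem sum_map_filter_eq_ite (l : List ((Int × Int))) (p : Int → Bool) :
    ((l.filter (fun sc => p sc.1)).map (fun sc => sc.2)).sum
      = (l.map (fun sc => if p sc.1 then sc.2 else 0)).sum := by
  induction l with
  | nil => rfl
  | cons a l ih =>
      by_cases h : p a.1
      · simp [h, ih]
      · simp [h, ih]

-- L12
theorem dp_final (L : List Int) (d : PySem.Dict Int Int) (h : DPInv L d) (p : Int → Bool) :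
    ((d.items.filter (fun sc => p sc.1)).map (fun sc => sc.2)).sum = (L.countP p : Int) := by
  obtain ⟨hnd, hget, hmem⟩ := h
  rw [sum_map_filter_eq_ite]
  rw [items_map_eq_keys_map d hnd (fun s c => if p s then c else 0)]
  have : ∀ s ∈ d.keys, (if p s then d.getD s 0 else 0) = (L.count s : Int) * (if p s then 1 else 0) := by
    intro s _
    by_cases hp : p s <;> simp [hp, hget s]
  rw [List.map_congr_left this, key_sum _ d.keys L hnd hmem,
    PySem.List.sum_map_ite_one_zero]

-- L11 loop
theorem loop_inv (W : List Int) : ∀ (l : List Int) (n : Nat) (d : PySem.Dict Int Int),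
    DPInv ((enumBar W n).map List.sum) d →
    DPInv ((enumBar W (n + l.length)).map List.sum) (l.foldl (fun c _ => dpStep W c) d) := by
  intro l
  induction l with
  | nil => intro n d h; simpa using h
  | cons a l ih =>
      intro n d h
      have h1 : DPInv ((enumBar W (n + 1)).map List.sum) (dpStep W d) := by
        rw [sums_succ]
        exact dpStep_inv W _ d h
      have h2 := ih (n + 1) (dpStep W d) h1
      simpa [Nat.add_assoc, Nat.add_comm, Nat.add_left_comm] using h2

theorem ports_agree (weights : List Int) (length period weight_bound : Int) :
    count_periodic_tuples_py weights length period weight_bound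
      = count_periodic_tuples_py_alt weights length period weight_bound := by
  unfold count_periodic_tuples_py count_periodic_tuples_py_alt
  by_cases hm : PySem.Int.mod length period ≠ 0
  · rw [if_pos hm, if_pos hm]
  · rw [if_neg hm, if_neg hm]
    set r := PySem.Int.floordiv length period with hr
    have hlen : (PySem.List.pyRange 0 period 1).length = period.toNat := by
      rw [PySem.List.length_pyRange_one]; simp
    have hinv := loop_inv weights (PySem.List.pyRange 0 period 1) 0
      (PySem.Dict.ofList [((0 : Int), (1 : Int))]) dp_base
    rw [hlen] at hinv
    have hB := dp_final _ _ hinv (fun s => decide (s * r ≤ weight_bound))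
    simp only [Nat.zero_add] at hB
    show (enumBar weights period.toNat).foldl
        (fun count bt => if bt.sum * r ≤ weight_bound then count + 1 else count) 0 = _
    rw [PySem.List.foldl_ite_add_one (fun bt : List Int => bt.sum * r ≤ weight_bound)
      (enumBar weights period.toNat) (0 : Int), zero_add]
    have hc : List.countP (fun s => decide (s * r ≤ weight_bound))
        (List.map List.sum (enumBar weights period.toNat))
        = List.countP (fun bt => decide (bt.sum * r ≤ weight_bound)) (enumBar weights period.toNat) := by
      rw [List.countP_map]; rfl
    rw [← hc]
    exact hB.symm

-- ===== VERDICT (by name: the statement is the Claim_ definition above) =====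
theorem count_periodic_tuples_py_spec : Claim_equal_count_periodic_tuples_py := by
  intro weights length period weight_bound _ _
  exact ports_agree weights length period weight_bound
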